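-- pv_equiv track=rewrite | github.com/chrisPien/soloTranscription | tech_prediction/create_xml.py | find_practical_tied_durations
-- ===== SOURCE A (Python) =====
-- def find_practical_tied_durations(duration, current_beat):
--     practical_ties = []
--     subdivisions = [3, 4, 6, 8, 9, 12, 18, 24, 36, 48]
--     beat_length = [12, 24, 36, 48]
--
--     if current_beat == 0 and duration in subdivisions:
--         return practical_ties
--
--     for i in range(1, duration):
--         if i in subdivisions and (duration - i) in subdivisions:
--             if (current_beat + i in beat_length) and ((current_beat + duration not in beat_length) or (duration not in beat_length)):
--                 practical_ties.append((i, duration - i))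
--
--     return practical_ties
-- ===== SOURCE B (Python) =====
-- def find_practical_tied_durations(duration, current_beat):
--     subdivisions = [3, 4, 6, 8, 9, 12, 18, 24, 36, 48]
--     beat_length = [12, 24, 36, 48]
--
--     if current_beat == 0 and duration in subdivisions:
--         return []
--     if current_beat + duration in beat_length and duration in beat_length:
--         return []
--     # a tie point must land on a beat boundary: first part = b - current_beat
--     return [(b - current_beat, duration - b + current_beat)
--             for b in beat_length
--             if b - current_beat in subdivisions
--             and duration - b + current_beat in subdivisions
--             and b - current_beat < duration]
-- ===== Notes on version B (the rewrite author's own statement) =====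
-- stated objective: faster
-- what changed: Instead of scanning every integer i in range(1, duration) with membership tests, B hoists the duration-independent beat condition into an early return and enumerates only the four beat boundaries b, taking the first part as b - current_beat, which yields the same ascending list in constant time.
import Mathlib
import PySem

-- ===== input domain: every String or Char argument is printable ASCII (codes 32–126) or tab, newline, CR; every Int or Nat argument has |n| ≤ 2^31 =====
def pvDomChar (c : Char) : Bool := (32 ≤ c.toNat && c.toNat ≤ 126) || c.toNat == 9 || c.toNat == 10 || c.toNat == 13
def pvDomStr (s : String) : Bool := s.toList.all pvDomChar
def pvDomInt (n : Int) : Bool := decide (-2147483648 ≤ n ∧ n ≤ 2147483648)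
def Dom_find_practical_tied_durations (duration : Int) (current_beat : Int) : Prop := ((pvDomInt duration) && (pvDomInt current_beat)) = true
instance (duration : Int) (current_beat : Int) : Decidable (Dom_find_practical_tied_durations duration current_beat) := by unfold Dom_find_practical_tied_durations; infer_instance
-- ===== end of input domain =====

-- B replaces A's linear scan over range(1, duration) by an O(1) enumeration of the four
-- beat boundaries (first tied part = boundary - current_beat); return value only, no side effects.

-- ===== PORT A =====
def pvSubs : List Int := [3, 4, 6, 8, 9, 12, 18, 24, 36, 48]
def pvBeats : List Int := [12, 24, 36, 48]

def find_practical_tied_durations (duration : Int) (current_beat : Int) : List (Int × Int) :=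
  if current_beat = 0 ∧ duration ∈ pvSubs then []
  else
    (PySem.List.pyRange 1 duration 1).foldl (fun acc i =>
      if i ∈ pvSubs ∧ (duration - i) ∈ pvSubs then
        if (current_beat + i ∈ pvBeats) ∧ ((current_beat + duration ∉ pvBeats) ∨ (duration ∉ pvBeats)) then
          acc ++ [(i, duration - i)]
        else acc
      else acc) []

-- ===== PORT B =====
def find_practical_tied_durations_alt (duration : Int) (current_beat : Int) : List (Int × Int) :=
  if current_beat = 0 ∧ duration ∈ pvSubs then []
  else if current_beat + duration ∈ pvBeats ∧ duration ∈ pvBeats then []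
  else
    (pvBeats.filter (fun b =>
        decide ((b - current_beat ∈ pvSubs) ∧ (duration - b + current_beat ∈ pvSubs) ∧ b - current_beat < duration))).map
      (fun b => (b - current_beat, duration - b + current_beat))

-- ===== PRECONDITION & SPEC =====
def Spec_find_practical_tied_durations (duration : Int) (current_beat : Int) (out : List (Int × Int)) : Prop := out = find_practical_tied_durations_alt duration current_beat
instance (duration : Int) (current_beat : Int) (out : List (Int × Int)) : Decidable (Spec_find_practical_tied_durations duration current_beat out) := by unfold Spec_find_practical_tied_durations; infer_instance

-- ===== CLAIM (what is proved, stated in full; the proofs are below) =====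
def Claim_equal_find_practical_tied_durations : Prop := ∀ (duration : Int) (current_beat : Int), Dom_find_practical_tied_durations duration current_beat → Spec_find_practical_tied_durations duration current_beat (find_practical_tied_durations duration current_beat)

-- ===== LEMMAS AND PROOFS =====

-- two strictly increasing integer lists with the same members are equal
lemma pv_strict_sorted_eq {l1 l2 : List Int}
    (h1 : l1.Pairwise (· < ·)) (h2 : l2.Pairwise (· < ·))
    (hm : ∀ x, x ∈ l1 ↔ x ∈ l2) : l1 = l2 := by
  exact List.Perm.eq_of_pairwise (fun a b _ _ hab hba => absurd hba (not_lt.2 hab.le))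
    h1 h2 ((List.perm_ext_iff_of_nodup h1.nodup h2.nodup).2 hm)

theorem find_practical_tied_durations_spec : Claim_equal_find_practical_tied_durations := by
  intro d cb _
  unfold Spec_find_practical_tied_durations find_practical_tied_durations find_practical_tied_durations_alt
  by_cases h0 : cb = 0 ∧ d ∈ pvSubs
  · simp [h0]
  · simp only [if_neg h0]
    by_cases hG : cb + d ∈ pvBeats ∧ d ∈ pvBeats
    · -- A's inner condition is always false
      rw [if_pos hG]
      have hbody : (fun (acc : List (Int × Int)) (i : Int) =>
          if i ∈ pvSubs ∧ (d - i) ∈ pvSubs then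
            if (cb + i ∈ pvBeats) ∧ ((cb + d ∉ pvBeats) ∨ (d ∉ pvBeats)) then
              acc ++ [(i, d - i)]
            else acc
          else acc) = fun acc _ => acc := by
        funext acc i
        split_ifs with _ h2
        · exact absurd h2 (by tauto)
        · rfl
        · rfl
      rw [hbody, List.foldl_fixed]
    · rw [if_neg hG]
      -- collapse A's nested ifs into a single append-if and use foldl_append_if
      have hbody : (fun (acc : List (Int × Int)) (i : Int) =>
          if i ∈ pvSubs ∧ (d - i) ∈ pvSubs then
            if (cb + i ∈ pvBeats) ∧ ((cb + d ∉ pvBeats) ∨ (d ∉ pvBeats)) then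
              acc ++ [(i, d - i)]
            else acc
          else acc)
          = fun acc i =>
            if (decide ((i ∈ pvSubs) ∧ ((d - i) ∈ pvSubs) ∧ (cb + i ∈ pvBeats))) = true then
              acc ++ [(i, d - i)]
            else acc := by
        funext acc i
        by_cases hi : (i ∈ pvSubs) ∧ ((d - i) ∈ pvSubs) ∧ (cb + i ∈ pvBeats)
        · simp [hi]
          tauto
        · split_ifs with a b <;> simp_all
      rw [hbody, PySem.List.foldl_append_if, List.nil_append]
      -- rewrite B as a map over a shifted filtered list
      have hB : (pvBeats.filter (fun b =>
            decide ((b - cb ∈ pvSubs) ∧ (d - b + cb ∈ pvSubs) ∧ b - cb < d))).map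
              (fun b => (b - cb, d - b + cb))
          = ((pvBeats.map (fun b => b - cb)).filter (fun i =>
              decide ((i ∈ pvSubs) ∧ ((d - i) ∈ pvSubs) ∧ i < d))).map
              (fun i => (i, d - i)) := by
        rw [List.filter_map, List.map_map]
        congr 1
        · funext b
          simp only [Function.comp_apply]
          exact congrArg (Prod.mk (b - cb)) (by ring)
        · apply List.filter_congr
          intro b _
          have h : d - (b - cb) = d - b + cb := by ring
          simp [Function.comp, h]
      rw [hB]
      congr 1
      -- the two filtered index lists are equal
      apply pv_strict_sorted_eq
      · exact (PySem.List.pairwise_lt_pyRange_one 1 d).filter _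
      · refine List.Pairwise.filter _ ?_
        have hpb : pvBeats.Pairwise (· < ·) := by decide
        exact (List.pairwise_map).2 (hpb.imp (fun h => sub_lt_sub_right h cb))
      · intro x
        simp only [List.mem_filter, PySem.List.mem_pyRange_one, List.mem_map,
          decide_eq_true_eq]
        constructor
        · rintro ⟨⟨_, hlt⟩, hs, hds, hb⟩
          exact ⟨⟨cb + x, hb, by ring⟩, hs, hds, hlt⟩
        · rintro ⟨⟨b, hb, rfl⟩, hs, hds, hlt⟩
          refine ⟨⟨?_, hlt⟩, hs, hds, ?_⟩
          · revert hs; simp [pvSubs]; omega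
          · have : cb + (b - cb) = b := by ring
            rw [this]; exact hb
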